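-- pv_equiv track=rewrite | github.com/hopebo/Utils | mysql/item_clone_analyse.py | GetDerivedClassName
-- ===== SOURCE A (Python) =====
-- def GetDerivedClassName(derived_class_str):
--     derived_class_str = derived_class_str.strip().split()
--     class_name = ""
--     for chunk in derived_class_str:
--         chunk = chunk.strip()
--         if chunk == "class" or chunk == "final":
--             continue
--         else:
--             class_name = chunk
--
--     assert class_name
--     return class_name
-- ===== SOURCE B (Python) =====
-- def GetDerivedClassName(derived_class_str):
--     # scan the whitespace-split tokens from the end and return the first
--     # token that is not a keyword; assert-fails if none (as the original does)
--     for chunk in reversed(derived_class_str.split()):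
--         if chunk != "class" and chunk != "final":
--             return chunk
--     assert False
-- ===== Notes on version B (the rewrite author's own statement) =====
-- stated objective: simpler
-- what changed: Replaces A's full forward fold that keeps the last non-keyword token (with a redundant outer strip and per-chunk strip) by a single reverse scan over the split tokens that returns the first non-keyword token immediately; the all-keyword/empty case falls through to the same AssertionError.
import Mathlib
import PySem

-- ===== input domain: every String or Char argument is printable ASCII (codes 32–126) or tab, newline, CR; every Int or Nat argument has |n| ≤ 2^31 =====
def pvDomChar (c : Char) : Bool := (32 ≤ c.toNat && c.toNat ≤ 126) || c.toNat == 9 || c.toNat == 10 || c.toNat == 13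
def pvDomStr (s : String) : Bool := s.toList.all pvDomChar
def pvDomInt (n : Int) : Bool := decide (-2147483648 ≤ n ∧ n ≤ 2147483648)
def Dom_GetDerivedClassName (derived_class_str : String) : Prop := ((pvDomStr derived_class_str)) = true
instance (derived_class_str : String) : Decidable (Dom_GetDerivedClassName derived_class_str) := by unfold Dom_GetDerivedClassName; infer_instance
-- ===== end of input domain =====

-- B replaces A's forward fold keeping the last non-keyword token (plus redundant strips)
-- by an early-exit reverse scan returning the first non-keyword token; simpler, same values.


-- ===== PORT A =====
def GetDerivedClassName (derived_class_str : String) : String :=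
  (PySem.Str.split₀ (PySem.Str.strip derived_class_str)).foldl
    (fun class_name chunk =>
      let chunk := PySem.Str.strip chunk
      if chunk = "class" ∨ chunk = "final" then class_name else chunk) ""
  -- the trailing `assert class_name` raises exactly when the result is ""; excluded by Pre_

-- ===== PORT B =====
-- the reversed-loop of Source B; the [] case is the `assert False` path (outside Pre_)
def altFind : List String → String
  | [] => ""
  | chunk :: rest => if chunk ≠ "class" ∧ chunk ≠ "final" then chunk else altFind rest

def GetDerivedClassName_alt (derived_class_str : String) : String :=
  altFind (PySem.Str.split₀ derived_class_str).reverse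

-- ===== PRECONDITION & SPEC =====
-- Pre_ excludes exactly the inputs on which Python A's `assert class_name` raises:
-- strings whose whitespace-split tokens are all "class"/"final" (including the empty split).
def Pre_GetDerivedClassName (derived_class_str : String) : Prop :=
  ∃ t ∈ PySem.Str.split₀ derived_class_str, t ≠ "class" ∧ t ≠ "final"
instance (derived_class_str : String) : Decidable (Pre_GetDerivedClassName derived_class_str) := by
  unfold Pre_GetDerivedClassName; infer_instance

def pvWitness_GetDerivedClassName : String := "class Item_func final : public Item"

def Spec_GetDerivedClassName (derived_class_str : String) (out : String) : Prop :=
  out = GetDerivedClassName_alt derived_class_str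
instance (derived_class_str : String) (out : String) : Decidable (Spec_GetDerivedClassName derived_class_str out) := by
  unfold Spec_GetDerivedClassName; infer_instance

-- ===== CLAIM (what is proved, stated in full; the proofs are below) =====
def Claim_equal_GetDerivedClassName : Prop := ∀ (derived_class_str : String), Dom_GetDerivedClassName derived_class_str → Pre_GetDerivedClassName derived_class_str → Spec_GetDerivedClassName derived_class_str (GetDerivedClassName derived_class_str)

-- ===== LEMMAS AND PROOFS =====

-- go on an all-space suffix behaves like go on []
lemma go_all_space (sp : List Char) (h : ∀ c ∈ sp, PySem.Chars.isspace c = true)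
    (cur : List Char) (acc : List (List Char)) :
    PySem.Chars.split₀.go sp cur acc = PySem.Chars.split₀.go [] cur acc := by
  induction sp generalizing cur acc with
  | nil => rfl
  | cons c rest ih =>
    have hc := h c (by simp)
    have hr : ∀ x ∈ rest, PySem.Chars.isspace x = true := fun x hx => h x (by simp [hx])
    simp only [PySem.Chars.split₀.go, hc, if_true]
    by_cases hcur : cur.isEmpty
    · simp [hcur, ih hr, PySem.Chars.split₀.go]
    · simp [hcur, ih hr, PySem.Chars.split₀.go]

lemma go_append_space (s sp : List Char) (h : ∀ c ∈ sp, PySem.Chars.isspace c = true)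
    (cur : List Char) (acc : List (List Char)) :
    PySem.Chars.split₀.go (s ++ sp) cur acc = PySem.Chars.split₀.go s cur acc := by
  induction s generalizing cur acc with
  | nil => simpa using go_all_space sp h cur acc
  | cons c rest ih =>
    simp only [List.cons_append, PySem.Chars.split₀.go]
    by_cases hc : PySem.Chars.isspace c
    · by_cases hcur : cur.isEmpty <;> simp [hc, hcur, ih]
    · simp [hc, ih]

lemma go_prepend_space (sp s : List Char) (h : ∀ c ∈ sp, PySem.Chars.isspace c = true)
    (acc : List (List Char)) :
    PySem.Chars.split₀.go (sp ++ s) [] acc = PySem.Chars.split₀.go s [] acc := by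
  induction sp with
  | nil => rfl
  | cons c rest ih =>
    have hc := h c (by simp)
    simp only [List.cons_append, PySem.Chars.split₀.go, hc, if_true, List.isEmpty_nil]
    exact ih (fun x hx => h x (by simp [hx]))

lemma chars_split₀_lstrip (s : List Char) :
    PySem.Chars.split₀ (PySem.Chars.lstrip s) = PySem.Chars.split₀ s := by
  unfold PySem.Chars.split₀ PySem.Chars.lstrip
  conv_rhs => rw [← List.takeWhile_append_dropWhile (p := PySem.Chars.isspace) (l := s)]
  rw [go_prepend_space _ _ (fun c hc => List.mem_takeWhile_imp hc)]

lemma chars_split₀_rstrip (s : List Char) :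
    PySem.Chars.split₀ (PySem.Chars.rstrip s) = PySem.Chars.split₀ s := by
  unfold PySem.Chars.split₀ PySem.Chars.rstrip
  conv_rhs => rw [show s = (List.dropWhile PySem.Chars.isspace s.reverse).reverse
      ++ (List.takeWhile PySem.Chars.isspace s.reverse).reverse by
    rw [← List.reverse_append, List.takeWhile_append_dropWhile]
    · simp]
  rw [go_append_space _ _ (fun c hc => List.mem_takeWhile_imp (List.mem_reverse.mp hc))]

lemma chars_split₀_strip (s : List Char) :
    PySem.Chars.split₀ (PySem.Chars.strip s) = PySem.Chars.split₀ s := by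
  unfold PySem.Chars.strip
  rw [chars_split₀_rstrip, chars_split₀_lstrip]

lemma str_split₀_strip (s : String) :
    PySem.Str.split₀ (PySem.Str.strip s) = PySem.Str.split₀ s := by
  unfold PySem.Str.split₀
  rw [PySem.Str.toList_strip, chars_split₀_strip]

-- every token produced by split₀.go contains no whitespace character
lemma go_tokens_no_space (s : List Char) (cur : List Char) (acc : List (List Char))
    (hcur : ∀ c ∈ cur, PySem.Chars.isspace c = false)
    (hacc : ∀ t ∈ acc, ∀ c ∈ t, PySem.Chars.isspace c = false) :
    ∀ t ∈ PySem.Chars.split₀.go s cur acc, ∀ c ∈ t, PySem.Chars.isspace c = false := by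
  induction s generalizing cur acc with
  | nil =>
    intro t ht
    simp only [PySem.Chars.split₀.go] at ht
    by_cases h : cur.isEmpty
    · simp [h] at ht; exact hacc t (by simpa using ht)
    · simp [h] at ht
      rcases ht with ht | rfl
      · exact hacc t ht
      · intro c hc; exact hcur c (by simpa using hc)
  | cons c rest ih =>
    intro t ht
    simp only [PySem.Chars.split₀.go] at ht
    by_cases hc : PySem.Chars.isspace c
    · by_cases h : cur.isEmpty
      · simp [hc, h] at ht
        exact ih [] acc (by simp) hacc t ht
      · simp [hc, h] at ht
        refine ih [] (cur.reverse :: acc) (by simp) ?_ t ht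
        intro u hu
        rcases List.mem_cons.mp hu with rfl | hu
        · intro x hx; exact hcur x (by simpa using hx)
        · exact hacc u hu
    · simp [hc] at ht
      refine ih (c :: cur) acc ?_ hacc t ht
      intro x hx
      rcases List.mem_cons.mp hx with hx | hx
      · subst hx; simpa using hc
      · exact hcur x hx

lemma dropWhile_no_space (l : List Char) (h : ∀ c ∈ l, PySem.Chars.isspace c = false) :
    List.dropWhile PySem.Chars.isspace l = l := by
  rw [List.dropWhile_eq_self_iff]
  intro hlen
  simp [h _ (List.getElem_mem hlen)]

lemma strip_no_space (l : List Char) (h : ∀ c ∈ l, PySem.Chars.isspace c = false) :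
    PySem.Chars.strip l = l := by
  unfold PySem.Chars.strip PySem.Chars.lstrip PySem.Chars.rstrip
  rw [dropWhile_no_space l h,
    dropWhile_no_space l.reverse (fun c hc => h c (List.mem_reverse.mp hc)),
    List.reverse_reverse]

lemma str_strip_token (s : String) (t : String) (ht : t ∈ PySem.Str.split₀ s) :
    PySem.Str.strip t = t := by
  unfold PySem.Str.split₀ at ht
  rcases List.mem_map.mp ht with ⟨l, hl, rfl⟩
  have hns : ∀ c ∈ l, PySem.Chars.isspace c = false := by
    have := go_tokens_no_space s.toList [] [] (by simp) (by simp)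
    exact this l hl
  unfold PySem.Str.strip
  rw [String.toList_ofList, strip_no_space l hns]

-- A's fold (without the per-chunk strip) equals B's reverse scan, given some non-keyword token exists
lemma foldl_eq_altFind (l : List String)
    (hpre : ∃ t ∈ l, t ≠ "class" ∧ t ≠ "final") :
    l.foldl (fun class_name chunk =>
        if chunk = "class" ∨ chunk = "final" then class_name else chunk) ""
      = altFind l.reverse := by
  induction l using List.reverseRecOn with
  | nil => simp at hpre
  | append_singleton l x ih =>
    rw [List.foldl_append, List.foldl_cons, List.foldl_nil, List.reverse_append]
    simp only [List.reverse_singleton, List.singleton_append, altFind]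
    by_cases hx : x = "class" ∨ x = "final"
    · have hx' : ¬ (x ≠ "class" ∧ x ≠ "final") := by tauto
      rw [if_pos hx, if_neg hx']
      apply ih
      rcases hpre with ⟨t, ht, hnt⟩
      rcases List.mem_append.mp ht with h | h
      · exact ⟨t, h, hnt⟩
      · simp at h; subst h; tauto
    · have hx' : x ≠ "class" ∧ x ≠ "final" := by tauto
      rw [if_neg hx, if_pos hx']

-- ===== VERDICT (by name: the statement is the Claim_ definition above) =====
theorem GetDerivedClassName_spec : Claim_equal_GetDerivedClassName := by
  intro s _ hpre
  unfold Spec_GetDerivedClassName GetDerivedClassName GetDerivedClassName_alt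
  rw [str_split₀_strip]
  have hstep : (PySem.Str.split₀ s).foldl
      (fun class_name chunk =>
        let chunk := PySem.Str.strip chunk
        if chunk = "class" ∨ chunk = "final" then class_name else chunk) ""
      = (PySem.Str.split₀ s).foldl
      (fun class_name chunk =>
        if chunk = "class" ∨ chunk = "final" then class_name else chunk) "" := by
    apply PySem.List.foldl_congr_mem
    intro a x hx
    simp only [str_strip_token s x hx]
  rw [hstep]
  exact foldl_eq_altFind _ hpre
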